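-- pv_equiv track=rewrite | github.com/Darkkyelfo/Tetris-PyQt | Agente.py | blocosSobreBuracos
-- ===== SOURCE A (Python) =====
-- def blocosSobreBuracos(campo):
--     blocos=0
--     for j in range(0,len(campo[0])):
--         diferenteZero=False
--         for i in range(0,len(campo)):
--            if(campo[i][j]!=0):
--                diferenteZero=True
--            else:
--                if(diferenteZero):
--                    diferenteZero=False
--                    blocos+=1
--     return blocos
-- ===== SOURCE B (Python) =====
-- def blocosSobreBuracos(campo):
--     largura = len(campo[0])
--     total = 0
--     for cima, baixo in zip(campo, campo[1:]):
--         for j in range(largura):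
--             if cima[j] != 0 and baixo[j] == 0:
--                 total += 1
--     return total
-- ===== Notes on version B (the rewrite author's own statement) =====
-- stated objective: simpler
-- what changed: Replaces the per-column scan with a stateful diferenteZero flag by a stateless row-major count of adjacent vertical pairs (upper cell nonzero, lower cell zero) over zip(campo, campo[1:]).
import Mathlib
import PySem

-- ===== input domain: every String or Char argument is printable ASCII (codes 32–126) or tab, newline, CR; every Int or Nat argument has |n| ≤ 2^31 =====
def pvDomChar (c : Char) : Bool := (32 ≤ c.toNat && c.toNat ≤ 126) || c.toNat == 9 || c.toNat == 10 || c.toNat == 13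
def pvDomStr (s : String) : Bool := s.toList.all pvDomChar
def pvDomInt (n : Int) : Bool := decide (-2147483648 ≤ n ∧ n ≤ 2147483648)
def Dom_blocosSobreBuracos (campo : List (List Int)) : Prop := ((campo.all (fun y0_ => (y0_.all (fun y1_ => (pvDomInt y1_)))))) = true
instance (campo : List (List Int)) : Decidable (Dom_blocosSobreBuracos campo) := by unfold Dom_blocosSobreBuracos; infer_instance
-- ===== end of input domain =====

-- B replaces A's per-column scan with a stateful flag by a stateless row-major
-- count of adjacent vertical (nonzero, zero) pairs; objective: simpler.

-- ===== PORT A =====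
def blocosSobreBuracos (campo : List (List Int)) : Int :=
  (List.range (campo.headD []).length).foldl (fun blocos j =>
    ((List.range campo.length).foldl
      (fun (st : Int × Bool) i =>
        if (campo.getD i []).getD j 0 ≠ 0 then (st.1, true)
        else if st.2 then (st.1 + 1, false) else (st.1, false))
      (blocos, false)).1) 0

-- ===== PORT B =====
def blocosSobreBuracos_alt (campo : List (List Int)) : Int :=
  (campo.zip campo.tail).foldl (fun total ab =>
    (List.range (campo.headD []).length).foldl (fun t j =>
      if ab.1.getD j 0 ≠ 0 ∧ ab.2.getD j 0 = 0 then t + 1 else t) total) 0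

-- ===== PRECONDITION & SPEC =====
-- Pre_ excludes exactly the inputs on which A raises IndexError: the empty grid
-- (campo[0]) and jagged grids with a row shorter than the first row.
def Pre_blocosSobreBuracos (campo : List (List Int)) : Prop :=
  campo ≠ [] ∧ ∀ r ∈ campo, (campo.headD []).length ≤ r.length

instance (campo : List (List Int)) : Decidable (Pre_blocosSobreBuracos campo) := by
  unfold Pre_blocosSobreBuracos; infer_instance

def pvWitness_blocosSobreBuracos : List (List Int) := [[1, 0], [0, 2], [3, 0]]

def Spec_blocosSobreBuracos (campo : List (List Int)) (out : Int) : Prop := out = blocosSobreBuracos_alt campo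
instance (campo : List (List Int)) (out : Int) : Decidable (Spec_blocosSobreBuracos campo out) := by unfold Spec_blocosSobreBuracos; infer_instance

-- ===== CLAIM (what is proved, stated in full; the proofs are below) =====
def Claim_equal_blocosSobreBuracos : Prop := ∀ (campo : List (List Int)), Dom_blocosSobreBuracos campo → Pre_blocosSobreBuracos campo → Spec_blocosSobreBuracos campo (blocosSobreBuracos campo)

-- ===== LEMMAS AND PROOFS =====

-- indicator of a block-over-hole pair at column j
def pvInd (j : Nat) (ab : List Int × List Int) : Int :=
  if ab.1.getD j 0 ≠ 0 ∧ ab.2.getD j 0 = 0 then 1 else 0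

-- count of the flag loop on a column, with initial flag
def pvCnt (flag : Bool) : List Int → Int
  | [] => 0
  | x :: xs => if x ≠ 0 then pvCnt true xs else (if flag then 1 else 0) + pvCnt false xs

-- adjacent-pair count on a column
def pvPairCnt (xs : List Int) : Int :=
  ((xs.zip xs.tail).map (fun p => if p.1 ≠ 0 ∧ p.2 = 0 then (1 : Int) else 0)).sum

-- 1 if the column starts with a zero
def pvHz : List Int → Int
  | [] => 0
  | x :: _ => if x = 0 then 1 else 0

theorem pv_foldl_congr {α β : Type} (l : List α) (f g : β → α → β) (init : β)
    (h : ∀ b a, f b a = g b a) : l.foldl f init = l.foldl g init := by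
  induction l generalizing init with
  | nil => rfl
  | cons x xs ih => rw [List.foldl_cons, List.foldl_cons, h, ih]

theorem pv_foldl_range_getD {α β : Type} (xs : List α) (d : α) (f : β → α → β) (init : β) :
    (List.range xs.length).foldl (fun s i => f s (xs.getD i d)) init = xs.foldl f init := by
  induction xs generalizing init with
  | nil => simp
  | cons x xs ih =>
    simp only [List.length_cons, List.range_succ_eq_map, List.foldl_cons, List.foldl_map,
      List.getD_cons_zero, List.getD_cons_succ]
    exact ih (f init x)

theorem pv_loop_eq (xs : List Int) (b : Int) (flag : Bool) :
    (xs.foldl (fun (st : Int × Bool) x =>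
      if x ≠ 0 then (st.1, true) else if st.2 then (st.1 + 1, false) else (st.1, false))
      (b, flag)).1 = b + pvCnt flag xs := by
  induction xs generalizing b flag with
  | nil => simp [pvCnt]
  | cons x xs ih =>
    rw [List.foldl_cons, pvCnt]
    by_cases hx : x ≠ 0
    · rw [if_pos hx, if_pos hx, ih]
    · rw [if_neg hx, if_neg hx]
      cases flag
      · rw [show (if (false : Bool) = true then (b + 1, false) else (b, (false : Bool))) = (b, false) from rfl, ih]
        norm_num
      · rw [show (if (true : Bool) = true then (b + 1, false) else (b, (false : Bool))) = (b + 1, false) from rfl, ih]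
        norm_num
        ring

theorem pv_pairCnt_cons (x : Int) (xs : List Int) :
    pvPairCnt (x :: xs) = (if x ≠ 0 then pvHz xs else 0) + pvPairCnt xs := by
  cases xs with
  | nil => simp [pvPairCnt, pvHz]
  | cons y ys =>
    simp only [pvPairCnt, pvHz, List.tail_cons, List.zip_cons_cons, List.map_cons, List.sum_cons]
    by_cases hx : x ≠ 0 <;> by_cases hy : y = 0 <;> simp [hx, hy]

theorem pv_cnt_eq (xs : List Int) (flag : Bool) :
    pvCnt flag xs = (if flag then pvHz xs else 0) + pvPairCnt xs := by
  induction xs generalizing flag with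
  | nil => simp [pvCnt, pvHz, pvPairCnt]
  | cons x xs ih =>
    rw [pvCnt, pv_pairCnt_cons, ih true, ih false]
    cases flag <;> by_cases hx : x ≠ 0 <;> simp [pvHz, hx]

theorem pv_foldl_add_eq_sum {α : Type} (l : List α) (c : α → Int) (init : Int) :
    l.foldl (fun b j => b + c j) init = init + (l.map c).sum := by
  induction l generalizing init with
  | nil => simp
  | cons x xs ih =>
    rw [List.foldl_cons, ih, List.map_cons, List.sum_cons]
    ring_nf

theorem pv_sum_swap {α β : Type} (l : List α) (ps : List β) (f : α → β → Int) :
    (l.map (fun j => (ps.map (f j)).sum)).sum = (ps.map (fun p => (l.map (fun j => f j p)).sum)).sum := by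
  induction ps with
  | nil => simp
  | cons p ps ih =>
    simp only [List.map_cons, List.sum_cons, ← ih, ← List.sum_map_add]

-- A equals the column-wise sum of pair counts
theorem pv_A_eq (campo : List (List Int)) :
    blocosSobreBuracos campo =
      ((List.range (campo.headD []).length).map
        (fun j => ((campo.zip campo.tail).map (pvInd j)).sum)).sum := by
  unfold blocosSobreBuracos
  have hinner : ∀ (j : Nat) (b : Int),
      ((List.range campo.length).foldl
        (fun (st : Int × Bool) i =>
          if (campo.getD i []).getD j 0 ≠ 0 then (st.1, true)
          else if st.2 then (st.1 + 1, false) else (st.1, false))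
        (b, false)).1 = b + ((campo.zip campo.tail).map (pvInd j)).sum := by
    intro j b
    rw [pv_foldl_range_getD campo []
      (fun (st : Int × Bool) r =>
        if r.getD j 0 ≠ 0 then (st.1, true)
        else if st.2 then (st.1 + 1, false) else (st.1, false)) (b, false)]
    have hmap : campo.foldl
        (fun (st : Int × Bool) r =>
          if r.getD j 0 ≠ 0 then (st.1, true)
          else if st.2 then (st.1 + 1, false) else (st.1, false)) (b, false)
        = (campo.map (fun r => r.getD j 0)).foldl
          (fun (st : Int × Bool) x =>
            if x ≠ 0 then (st.1, true)
            else if st.2 then (st.1 + 1, false) else (st.1, false)) (b, false) := by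
      rw [List.foldl_map]
    rw [hmap, pv_loop_eq, pv_cnt_eq]
    simp only [if_neg (by simp : ¬((false : Bool) = true)), pvPairCnt]
    have hzip : ((campo.map (fun r => r.getD j 0)).zip (campo.map (fun r => r.getD j 0)).tail)
        = (campo.zip campo.tail).map (fun p => (p.1.getD j 0, p.2.getD j 0)) := by
      rw [← List.map_tail, List.zip_map]
      rfl
    rw [hzip, List.map_map]
    have hfun : ((fun p : Int × Int => if p.1 ≠ 0 ∧ p.2 = 0 then (1 : Int) else 0) ∘
        (fun p : List Int × List Int => (p.1.getD j 0, p.2.getD j 0))) = pvInd j := by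
      funext p
      rfl
    rw [hfun]
    ring
  calc (List.range (campo.headD []).length).foldl (fun blocos j =>
        ((List.range campo.length).foldl
          (fun (st : Int × Bool) i =>
            if (campo.getD i []).getD j 0 ≠ 0 then (st.1, true)
            else if st.2 then (st.1 + 1, false) else (st.1, false))
          (blocos, false)).1) 0
      = (List.range (campo.headD []).length).foldl
          (fun blocos j => blocos + ((campo.zip campo.tail).map (pvInd j)).sum) 0 := by
        exact pv_foldl_congr _ _ _ _ (fun b j => hinner j b)
    _ = _ := by rw [pv_foldl_add_eq_sum]; ring

-- B equals the row-pair-wise sum of column indicators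
theorem pv_B_eq (campo : List (List Int)) :
    blocosSobreBuracos_alt campo =
      ((campo.zip campo.tail).map
        (fun ab => ((List.range (campo.headD []).length).map (fun j => pvInd j ab)).sum)).sum := by
  unfold blocosSobreBuracos_alt
  have hinner : ∀ (ab : List Int × List Int) (t : Int),
      (List.range (campo.headD []).length).foldl
        (fun t j => if ab.1.getD j 0 ≠ 0 ∧ ab.2.getD j 0 = 0 then t + 1 else t) t
      = t + ((List.range (campo.headD []).length).map (fun j => pvInd j ab)).sum := by
    intro ab t
    have : (fun (t : Int) (j : Nat) => if ab.1.getD j 0 ≠ 0 ∧ ab.2.getD j 0 = 0 then t + 1 else t)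
        = fun t j => t + pvInd j ab := by
      funext t j
      unfold pvInd
      split_ifs <;> simp
    rw [this, pv_foldl_add_eq_sum]
  calc (campo.zip campo.tail).foldl (fun total ab =>
        (List.range (campo.headD []).length).foldl
          (fun t j => if ab.1.getD j 0 ≠ 0 ∧ ab.2.getD j 0 = 0 then t + 1 else t) total) 0
      = (campo.zip campo.tail).foldl
          (fun total ab => total + ((List.range (campo.headD []).length).map (fun j => pvInd j ab)).sum) 0 := by
        exact pv_foldl_congr _ _ _ _ (fun t ab => hinner ab t)
    _ = _ := by rw [pv_foldl_add_eq_sum]; ring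

-- ===== VERDICT (by name: the statement is the Claim_ definition above) =====
theorem blocosSobreBuracos_spec : Claim_equal_blocosSobreBuracos := by
  intro campo _ _
  unfold Spec_blocosSobreBuracos
  rw [pv_A_eq, pv_B_eq, pv_sum_swap]
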